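-- pv_equiv track=rewrite | github.com/w4rhawk/VehicleTracking | VehicleTrackingUI/app/main.py | noramlize
-- ===== SOURCE A (Python) =====
-- def noramlize(data):
-- 	normalized = ""
-- 	for i in data:
-- 		if(i != '[' and i != ']' and i != ' ' and i != '\"' and i != '-'):
-- 			if(i==','):
-- 				normalized=""
-- 				continue
-- 			if(i=='.'):
-- 				continue
-- 			normalized+=i
-- 	return normalized
-- ===== SOURCE B (Python) =====
-- def noramlize(data):
-- 	tail = data.rpartition(',')[2]
-- 	return ''.join(c for c in tail if c not in '[] "-.')
-- ===== Notes on version B (the rewrite author's own statement) =====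
-- stated objective: simpler
-- what changed: Replaces A's per-character accumulate-and-reset loop (with repeated string += rebuilds) by rpartition to take the segment after the last comma, then one C-level filtering pass over only that tail.
import Mathlib
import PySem

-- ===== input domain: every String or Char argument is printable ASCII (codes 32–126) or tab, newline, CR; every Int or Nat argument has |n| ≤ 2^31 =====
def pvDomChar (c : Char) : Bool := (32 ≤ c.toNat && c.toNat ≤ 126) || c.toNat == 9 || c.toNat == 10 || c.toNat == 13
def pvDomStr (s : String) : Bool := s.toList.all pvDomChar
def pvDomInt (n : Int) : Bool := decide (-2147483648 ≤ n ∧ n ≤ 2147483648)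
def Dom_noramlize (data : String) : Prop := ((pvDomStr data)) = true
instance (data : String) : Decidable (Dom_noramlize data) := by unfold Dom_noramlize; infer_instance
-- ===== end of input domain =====

-- B replaces A's accumulate-and-reset character loop by "take the part after the last comma,
-- then filter the unwanted characters out of that tail" (objective: simpler).

-- ===== PORT A =====
-- the Python string accumulator is modeled as a List Char, turned into a String at the end
def noramlizeStep (acc : List Char) (i : Char) : List Char :=
  if i ≠ '[' ∧ i ≠ ']' ∧ i ≠ ' ' ∧ i ≠ '"' ∧ i ≠ '-' then
    if i = ',' then []
    else if i = '.' then acc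
    else acc ++ [i]
  else acc

def noramlize (data : String) : String :=
  String.ofList (data.toList.foldl noramlizeStep [])

-- ===== PORT B =====
-- rpartition(',')[2] = the suffix after the last ',' (whole string if no comma)
def noramlize_alt (data : String) : String :=
  String.ofList
    (((data.toList.reverse.takeWhile (fun c => c ≠ ',')).reverse).filter
      (fun c => c ∉ ['[', ']', ' ', '"', '-', '.']))

-- ===== PRECONDITION & SPEC =====
def Spec_noramlize (data : String) (out : String) : Prop := out = noramlize_alt data
instance (data : String) (out : String) : Decidable (Spec_noramlize data out) := by unfold Spec_noramlize; infer_instance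

-- ===== CLAIM (what is proved, stated in full; the proofs are below) =====
def Claim_equal_noramlize : Prop := ∀ (data : String), Dom_noramlize data → Spec_noramlize data (noramlize data)

-- ===== LEMMAS AND PROOFS =====

def pvAfterLast (l : List Char) : List Char :=
  (l.reverse.takeWhile (fun c => c ≠ ',')).reverse

def pvKeep (c : Char) : Bool := decide (c ∉ (['[', ']', ' ', '"', '-', '.'] : List Char))

theorem pvAfterLast_concat (l : List Char) (c : Char) :
    pvAfterLast (l ++ [c]) = if c = ',' then [] else pvAfterLast l ++ [c] := by
  unfold pvAfterLast
  simp [List.takeWhile_cons]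
  split_ifs with h <;> simp

theorem pvMain (l : List Char) (acc : List Char) :
    l.foldl noramlizeStep acc =
      (if ',' ∈ l then [] else acc) ++ (pvAfterLast l).filter pvKeep := by
  induction l using List.reverseRecOn generalizing acc with
  | nil => simp [pvAfterLast]
  | append_singleton l' c ih =>
    rw [List.foldl_append, ih, pvAfterLast_concat]
    by_cases hc : c = ','
    · subst hc
      simp [noramlizeStep]
    · have hmem : ',' ∈ l' ++ [c] ↔ ',' ∈ l' := by
        simp [Ne.symm hc]
      rw [if_neg hc]
      simp only [List.filter_append, hmem]
      by_cases hk : pvKeep c = true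
      · have : noramlizeStep ((if ',' ∈ l' then [] else acc) ++ (pvAfterLast l').filter pvKeep) c
            = (if ',' ∈ l' then [] else acc) ++ (pvAfterLast l').filter pvKeep ++ [c] := by
          unfold noramlizeStep
          unfold pvKeep at hk
          simp at hk
          obtain ⟨h1, h2, h3, h4, h5, h6⟩ := hk
          simp [h1, h2, h3, h4, h5, h6, hc]
        simp only [List.foldl_cons, List.foldl_nil]
        rw [this]
        simp [hk, List.append_assoc]
      · have hk' : pvKeep c = false := by simpa using hk
        have hmc : c = '[' ∨ c = ']' ∨ c = ' ' ∨ c = '\"' ∨ c = '-' ∨ c = '.' := by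
          unfold pvKeep at hk'
          simp at hk'
          by_cases h1 : c = '['
          · exact Or.inl h1
          by_cases h2 : c = ']'
          · exact Or.inr (Or.inl h2)
          by_cases h3 : c = ' '
          · exact Or.inr (Or.inr (Or.inl h3))
          by_cases h4 : c = '\"'
          · exact Or.inr (Or.inr (Or.inr (Or.inl h4)))
          by_cases h5 : c = '-'
          · exact Or.inr (Or.inr (Or.inr (Or.inr (Or.inl h5))))
          exact Or.inr (Or.inr (Or.inr (Or.inr (Or.inr (hk' h1 h2 h3 h4 h5)))))
        have : noramlizeStep ((if ',' ∈ l' then [] else acc) ++ (pvAfterLast l').filter pvKeep) c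
            = (if ',' ∈ l' then [] else acc) ++ (pvAfterLast l').filter pvKeep := by
          unfold noramlizeStep
          rcases hmc with h | h | h | h | h | h <;> simp [h]
        simp only [List.foldl_cons, List.foldl_nil]
        rw [this]
        simp [hk']

-- ===== VERDICT (by name: the statement is the Claim_ definition above) =====
theorem noramlize_spec : Claim_equal_noramlize := by
  intro data _
  unfold Spec_noramlize noramlize noramlize_alt
  rw [pvMain]
  have : (if ',' ∈ data.toList then ([] : List Char) else []) = [] := by split_ifs <;> rfl
  rw [this, List.nil_append]
  rfl
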